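-- pv_equiv track=rewrite | github.com/ahmetcanozturk/HackerRank-Portfolio | Python/waiter.py | waiter
-- ===== SOURCE A (Python) =====
-- def waiter(number, q):
--     prime = 1
--     A = []
--     B = []
--     A.append([])
--     B.append([])
--     for elm in number:
--         A[0].append(elm)
--     i = 1
--     while i <= q:
--         A.append([])
--         B.append([])
--         prime = getIthPrime(i, prime)
--         while len(A[i-1]) > 0:
--             elm = A[i-1].pop(len(A[i-1]) - 1)
--             if (elm % prime == 0):
--                 B[i].append(elm)
--             else:
--                 A[i].append(elm)
--         i = i + 1
--     result = []
--     for k in range(1, len(B)):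
--         while len(B[k]) > 0:
--             elm = B[k].pop(len(B[k]) - 1)
--             result.append(elm)
--     while len(A[q]) > 0:
--         elm = A[q].pop(len(A[q]) - 1)
--         result.append(elm)
--     return result
--
-- def getIthPrime(idx, lastPrime):
--     num = lastPrime
--     found = False
--     while (not found and num < 1000001):
--         prime = True
--         j = 2
--         while prime and j < num:
--             if(num % j == 0):
--                 prime = False
--             j = j + 1
--         if (prime and num > lastPrime):
--             found = True
--         if (not found):
--             num = num + 1
--     return num
-- ===== SOURCE B (Python) =====
-- def waiter(number, q):
--     # one pass per round with filters (instead of A's pop-based stacks),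
--     # next prime by sqrt-bounded trial division (instead of A's full trial division).
--     out = []
--     cur = number
--     p = 1
--     rounds = 0
--     while rounds < q:
--         p = _next_prime(p)
--         out.extend(x for x in cur if x % p == 0)
--         cur = [x for x in cur if x % p != 0][::-1]
--         rounds += 1
--     out.extend(cur[::-1])
--     return out
--
-- def _is_prime(n):
--     j = 2
--     while j * j <= n:
--         if n % j == 0:
--             return False
--         j += 1
--     return True
--
-- def _next_prime(last):
--     m = last + 1
--     while m <= 1000000:
--         if _is_prime(m):
--             return m
--         m += 1
--     return 1000001  # same hard search cap as the original
-- ===== Notes on version B (the rewrite author's own statement) =====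
-- stated objective: faster
-- what changed: B replaces A's pop-one-element-at-a-time stack shuffling with one filter/reverse pass per round and emits results immediately, and replaces A's full trial division (testing every j < n for each candidate) by sqrt-bounded trial division in the next-prime search.
-- outside the precondition, e.g. on waiter([1, 2], -2): A raises IndexError, B returns [2, 1]
-- crash fix: For q <= -2 A raises IndexError on A[q]; B's loop simply never runs and it returns the input list reversed. — e.g. on waiter([1, 2], -2): A raises IndexError, B returns [2, 1]
import Mathlib
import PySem

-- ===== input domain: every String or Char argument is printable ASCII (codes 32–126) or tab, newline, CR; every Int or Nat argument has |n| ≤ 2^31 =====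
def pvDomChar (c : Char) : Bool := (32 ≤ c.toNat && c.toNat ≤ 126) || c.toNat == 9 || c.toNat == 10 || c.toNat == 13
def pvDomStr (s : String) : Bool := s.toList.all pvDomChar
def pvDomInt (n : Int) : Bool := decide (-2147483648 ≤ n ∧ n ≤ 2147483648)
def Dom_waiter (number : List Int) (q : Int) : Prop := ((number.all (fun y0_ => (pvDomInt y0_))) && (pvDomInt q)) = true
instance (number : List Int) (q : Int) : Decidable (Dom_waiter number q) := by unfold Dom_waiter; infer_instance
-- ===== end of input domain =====

-- B replaces A's pop-based stack shuffling by per-round filter/reverse passes and A's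
-- full trial division by sqrt-bounded trial division (objective: faster prime search).

-- ===== PORT A =====
-- inner 'while prime and j < num' of getIthPrime
def waiterTrialAux (num j : Int) : Bool :=
  if j < num then
    if PySem.Int.mod num j == 0 then false
    else waiterTrialAux num (j + 1)
  else true
termination_by (num - j).toNat
decreasing_by omega

-- 'while (not found and num < 1000001)' of getIthPrime
def getIthPrimeAux (lastPrime num : Int) : Int :=
  if num < 1000001 then
    if waiterTrialAux num 2 && decide (num > lastPrime) then num
    else getIthPrimeAux lastPrime (num + 1)
  else num
termination_by (1000001 - num).toNat
decreasing_by omega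

def getIthPrime (idx lastPrime : Int) : Int := getIthPrimeAux lastPrime lastPrime

-- 'while len(A[i-1]) > 0: elm = A[i-1].pop(...)' — pop from the back into (A[i], B[i])
def waiterRound (p : Int) (stk Ai Bi : List Int) : List Int × List Int :=
  if stk.isEmpty then (Ai, Bi)
  else
    let elm := stk.getLast!
    if PySem.Int.mod elm p == 0 then waiterRound p stk.dropLast Ai (Bi ++ [elm])
    else waiterRound p stk.dropLast (Ai ++ [elm]) Bi
termination_by stk.length
decreasing_by all_goals
  simp only [List.length_dropLast]
  cases stk <;> simp_all

-- 'while len(L) > 0: result.append(L.pop(len(L)-1))'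
def waiterEmit (stk res : List Int) : List Int :=
  if stk.isEmpty then res
  else waiterEmit stk.dropLast (res ++ [stk.getLast!])
termination_by stk.length
decreasing_by
  simp only [List.length_dropLast]
  cases stk <;> simp_all

-- 'while i <= q': A[0..i-2] are already emptied by their round's pops, so the state
-- carries only A[i-1] (curA), the B[1..i-1] stacks in order (Bs), prime and i.
def waiterLoop (q i prime : Int) (curA : List Int) (Bs : List (List Int)) :
    Int × List Int × List (List Int) :=
  if i ≤ q then
    -- p = getIthPrime(i, prime); (A[i], B[i]) = waiterRound p A[i-1] [] []
    waiterLoop q (i + 1) (getIthPrime i prime)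
      (waiterRound (getIthPrime i prime) curA [] []).1
      (Bs ++ [(waiterRound (getIthPrime i prime) curA [] []).2])
  else (prime, curA, Bs)
termination_by (q - i + 1).toNat
decreasing_by omega

def waiter (number : List Int) (q : Int) : List Int :=
  let t := waiterLoop q 1 1 number []
  let res := t.2.2.foldl (fun r b => waiterEmit b r) []
  waiterEmit t.2.1 res     -- A[q]: for q in {0,-1} this is A[0] = number, as in Python

-- ===== PORT B =====
-- 'while j*j <= n' sqrt-bounded trial division of _is_prime
def altIsPrimeAux (n j : Int) : Bool :=
  if j * j ≤ n then
    if PySem.Int.mod n j == 0 then false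
    else altIsPrimeAux n (j + 1)
  else true
termination_by (n + 1 - j).toNat
decreasing_by
  have hjn : j ≤ n := by nlinarith [mul_self_nonneg j]
  omega

def altIsPrime (n : Int) : Bool := altIsPrimeAux n 2

-- 'while m <= 1000000' of _next_prime
def altNextPrimeAux (m : Int) : Int :=
  if m ≤ 1000000 then
    if altIsPrime m then m else altNextPrimeAux (m + 1)
  else 1000001
termination_by (1000001 - m).toNat
decreasing_by omega

def altNextPrime (last : Int) : Int := altNextPrimeAux (last + 1)

-- 'while rounds < q' of Source B, counted down
def altGo : Nat → Int → List Int → List Int → List Int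
  | 0, _, cur, out => out ++ cur.reverse
  | n + 1, p, cur, out =>
      let p' := altNextPrime p
      altGo n p' ((cur.filter (fun x => !(PySem.Int.mod x p' == 0))).reverse)
        (out ++ cur.filter (fun x => PySem.Int.mod x p' == 0))

def waiter_alt (number : List Int) (q : Int) : List Int := altGo q.toNat 1 number []

-- ===== PRECONDITION & SPEC =====
-- Pre_ excludes q ≤ -2, where Python A raises IndexError on A[q] (B returns a value there).
def Pre_waiter (number : List Int) (q : Int) : Prop := -1 ≤ q
instance (number : List Int) (q : Int) : Decidable (Pre_waiter number q) := by
  unfold Pre_waiter; infer_instance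

def pvWitness_waiter : List Int × Int := ([3, 4, 7, 12], 2)

-- A raises IndexError for q ≤ -2 (A[q] out of range); B returns the reversed list there.
def Raises_waiter (number : List Int) (q : Int) : Prop := q ≤ -2
instance (number : List Int) (q : Int) : Decidable (Raises_waiter number q) := by
  unfold Raises_waiter; infer_instance
def pvRaiseWitness_waiter : List Int × Int := ([1, 2], -2)
def pvRaiseWitnessOut_waiter : List Int := [2, 1]

def Spec_waiter (number : List Int) (q : Int) (out : List Int) : Prop := out = waiter_alt number q
instance (number : List Int) (q : Int) (out : List Int) : Decidable (Spec_waiter number q out) := by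
  unfold Spec_waiter; infer_instance

-- ===== CLAIM (what is proved, stated in full; the proofs are below) =====
def Claim_equal_waiter : Prop := ∀ (number : List Int) (q : Int), Dom_waiter number q →
  Pre_waiter number q → Spec_waiter number q (waiter number q)

def Claim_raises_waiter : Prop :=
  (∀ (number : List Int) (q : Int), Dom_waiter number q → Raises_waiter number q → ¬ Pre_waiter number q) ∧
  (Dom_waiter (pvRaiseWitness_waiter.1) (pvRaiseWitness_waiter.2) ∧
   Raises_waiter (pvRaiseWitness_waiter.1) (pvRaiseWitness_waiter.2) ∧
   waiter_alt (pvRaiseWitness_waiter.1) (pvRaiseWitness_waiter.2) = pvRaiseWitnessOut_waiter)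

-- ===== LEMMAS AND PROOFS =====

lemma trialAux_iff (num j : Int) :
    waiterTrialAux num j = true ↔ ∀ k, j ≤ k → k < num → ¬(k ∣ num) := by
  fun_induction waiterTrialAux num j with
  | case1 j h hm =>
      have hd : j ∣ num := by
        rw [← PySem.Int.mod_eq_zero_iff_dvd]; exact beq_iff_eq.mp hm
      simp only [Bool.false_eq_true, false_iff]
      intro hk
      exact hk j le_rfl h hd
  | case2 j h hm ih =>
      rw [ih]
      constructor
      · intro hk k h1 h2
        rcases eq_or_lt_of_le h1 with rfl | h1
        · rw [← PySem.Int.mod_eq_zero_iff_dvd]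
          simpa using hm
        · exact hk k (by omega) h2
      · intro hk k h1 h2; exact hk k (by omega) h2
  | case3 j h =>
      simp only [true_iff]
      intro k h1 h2; omega

lemma altAux_iff (n j : Int) (hj : 2 ≤ j) :
    altIsPrimeAux n j = true ↔ ∀ k, j ≤ k → k * k ≤ n → ¬(k ∣ n) := by
  revert hj
  fun_induction altIsPrimeAux n j with
  | case1 j h hm =>
      intro hj
      have hd : j ∣ n := by
        rw [← PySem.Int.mod_eq_zero_iff_dvd]; exact beq_iff_eq.mp hm
      simp only [Bool.false_eq_true, false_iff]
      intro hk
      exact hk j le_rfl h hd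
  | case2 j h hm ih =>
      intro hj
      rw [ih (by omega)]
      constructor
      · intro hk k h1 h2
        rcases eq_or_lt_of_le h1 with rfl | h1
        · rw [← PySem.Int.mod_eq_zero_iff_dvd]
          simpa using hm
        · exact hk k (by omega) h2
      · intro hk k h1 h2; exact hk k (by omega) h2
  | case3 j h =>
      intro hj
      simp only [true_iff]
      intro k h1 h2
      have : j * j ≤ k * k := by nlinarith
      omega

lemma divisor_sqrt (n : Int) (hn : 2 ≤ n) :
    (∀ k, 2 ≤ k → k < n → ¬(k ∣ n)) ↔ (∀ k, 2 ≤ k → k * k ≤ n → ¬(k ∣ n)) := by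
  constructor
  · intro h k h1 h2
    exact h k h1 (by nlinarith)
  · intro h k h1 h2 hd
    by_cases hs : k * k ≤ n
    · exact h k h1 hs hd
    · obtain ⟨d, hdq⟩ := hd
      have hk0 : 0 < k := by omega
      have hd2 : 2 ≤ d := by nlinarith
      have hdd : d * d ≤ n := by nlinarith
      exact h d hd2 hdd ⟨k, by linarith [hdq]⟩

lemma isPrime_eq (num : Int) (h : 2 ≤ num) : waiterTrialAux num 2 = altIsPrime num := by
  have h1 := trialAux_iff num 2
  have h2 := altAux_iff num 2 le_rfl
  rw [divisor_sqrt num h] at h1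
  unfold altIsPrime
  rw [Bool.eq_iff_iff, h1, h2]

lemma chain_eq (last : Int) (hl : 1 ≤ last) :
    ∀ num, last < num → num ≤ 1000001 → getIthPrimeAux last num = altNextPrimeAux num := by
  intro num
  fun_induction getIthPrimeAux last num with
  | case1 num h hc =>
      intro h1 h2
      rw [Bool.and_eq_true, decide_eq_true_iff] at hc
      rw [altNextPrimeAux, if_pos (show num ≤ 1000000 by omega), ← isPrime_eq num (by omega), hc.1]
      simp
  | case2 num h hc ih =>
      intro h1 h2
      rw [Bool.and_eq_true, decide_eq_true_iff] at hc
      have ht : waiterTrialAux num 2 = false := by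
        cases hw : waiterTrialAux num 2
        · rfl
        · exact absurd ⟨hw, h1⟩ hc
      rw [altNextPrimeAux, if_pos (by omega), ← isPrime_eq num (by omega), ht]
      simpa using ih (by omega) (by omega)
  | case3 num h =>
      intro h1 h2
      have : num = 1000001 := by omega
      subst this
      rw [altNextPrimeAux, if_neg (by omega)]

lemma next_eq (idx last : Int) (h1 : 1 ≤ last) (h2 : last ≤ 1000001) :
    getIthPrime idx last = altNextPrime last := by
  unfold getIthPrime altNextPrime
  by_cases h : last ≤ 1000000
  · rw [getIthPrimeAux, if_pos (by omega)]
    have : (waiterTrialAux last 2 && decide (last > last)) = false := by simp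
    rw [this]
    simp only [Bool.false_eq_true, if_false]
    exact chain_eq last h1 (last + 1) (by omega) (by omega)
  · have : last = 1000001 := by omega
    subst this
    rw [getIthPrimeAux, if_neg (by omega), altNextPrimeAux, if_neg (by omega)]

lemma next_bounds (m : Int) (h : 2 ≤ m) :
    2 ≤ altNextPrimeAux m ∧ altNextPrimeAux m ≤ 1000001 := by
  revert h
  fun_induction altNextPrimeAux m with
  | case1 m h hp => intro hm; exact ⟨hm, by omega⟩
  | case2 m h hp ih => intro hm; exact ih (by omega)
  | case3 m h => intro hm; exact ⟨by omega, le_rfl⟩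

lemma emit_eq (stk res : List Int) : waiterEmit stk res = res ++ stk.reverse := by
  induction stk using List.reverseRecOn generalizing res with
  | nil => simp [waiterEmit]
  | append_singleton xs x ih =>
      rw [waiterEmit]
      simp [ih]

lemma waiterRound_eq (p : Int) (stk Ai Bi : List Int) :
    waiterRound p stk Ai Bi =
      (Ai ++ (stk.filter (fun x => !(PySem.Int.mod x p == 0))).reverse,
       Bi ++ (stk.filter (fun x => PySem.Int.mod x p == 0)).reverse) := by
  induction stk using List.reverseRecOn generalizing Ai Bi with
  | nil => simp [waiterRound]
  | append_singleton xs x ih =>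
      rw [waiterRound]
      by_cases h : PySem.Int.mod x p = 0 <;> simp [h, ih]

lemma loop_Bs (q : Int) : ∀ (n : Nat) (i p : Int) (c : List Int) (Bs : List (List Int)),
    (q - i + 1).toNat = n →
    waiterLoop q i p c Bs =
      ((waiterLoop q i p c []).1, (waiterLoop q i p c []).2.1, Bs ++ (waiterLoop q i p c []).2.2) := by
  intro n
  induction n with
  | zero =>
      intro i p c Bs hn
      rw [waiterLoop, if_neg (by omega), waiterLoop, if_neg (by omega)]
      simp
  | succ n ih =>
      intro i p c Bs hn
      by_cases h : i ≤ q
      · rw [waiterLoop, if_pos h]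
        conv_rhs => rw [waiterLoop, if_pos h]
        simp only [List.nil_append]
        rw [ih (i + 1) _ _ _ (by omega), ih (i + 1) _ _ [_] (by omega)]
        simp
      · rw [waiterLoop, if_neg h, waiterLoop, if_neg h]
        simp

lemma loop_corr (q : Int) : ∀ (n : Nat) (i prime : Int) (curA res : List Int),
    (q - i + 1).toNat = n → 1 ≤ prime → prime ≤ 1000001 →
    waiterEmit (waiterLoop q i prime curA []).2.1
      ((waiterLoop q i prime curA []).2.2.foldl (fun r b => waiterEmit b r) res) =
    altGo n prime curA res := by
  intro n
  induction n with
  | zero =>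
      intro i prime curA res hn h1 h2
      rw [waiterLoop, if_neg (by omega)]
      simp [altGo, emit_eq]
  | succ n ih =>
      intro i prime curA res hn h1 h2
      have hiq : i ≤ q := by omega
      have hnext := next_eq i prime h1 h2
      have hb := next_bounds (prime + 1) (by omega)
      rw [waiterLoop, if_pos hiq]
      rw [loop_Bs q n (i + 1) _ _ _ (by omega)]
      simp only [List.nil_append, List.singleton_append, List.foldl_cons]
      rw [ih (i + 1) _ _ _ (by omega) (by rw [hnext]; exact le_trans (by omega) hb.1)
            (by rw [hnext]; exact hb.2)]
      simp only [altGo, hnext, waiterRound_eq, List.nil_append, List.reverse_reverse, emit_eq]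

-- ===== VERDICT (by name: the statement is the Claim_ definition above) =====
theorem waiter_spec : Claim_equal_waiter := by
  intro number q _ _
  unfold Spec_waiter waiter waiter_alt
  have h := loop_corr q q.toNat 1 1 number [] (by omega) (by omega) (by omega)
  simpa using h

theorem waiter_raises : Claim_raises_waiter := by
  unfold Claim_raises_waiter
  exact ⟨fun _ q _ hr => by unfold Raises_waiter Pre_waiter at *; omega, by decide⟩

-- self-check: the raise-witness output literal is indeed B's value there
theorem pvRaiseWitness_waiter_ok :
    waiter_alt pvRaiseWitness_waiter.1 pvRaiseWitness_waiter.2 = pvRaiseWitnessOut_waiter :=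
  waiter_raises.2.2.2
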